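-- pv_equiv track=rewrite | github.com/narku-coder/Geekbot-2 | normalFunctions.py | get_total_exp
-- ===== SOURCE A (Python) =====
-- def get_total_exp(lvl, exp):
--   num = lvl-1
--   total = 0
--   while num > 0:
--     total += num*100
--     num = num - 1
--   total += exp
--   return total
-- ===== SOURCE B (Python) =====
-- def get_total_exp(lvl, exp):
--   n = lvl - 1
--   if n <= 0:
--     return exp
--   return 50 * n * (n + 1) + exp
-- ===== Notes on version B (the rewrite author's own statement) =====
-- stated objective: faster
-- what changed: Replaced the O(lvl) decrementing while-loop summing 100*num with the closed-form arithmetic series 50*(lvl-1)*lvl + exp.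
import Mathlib
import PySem

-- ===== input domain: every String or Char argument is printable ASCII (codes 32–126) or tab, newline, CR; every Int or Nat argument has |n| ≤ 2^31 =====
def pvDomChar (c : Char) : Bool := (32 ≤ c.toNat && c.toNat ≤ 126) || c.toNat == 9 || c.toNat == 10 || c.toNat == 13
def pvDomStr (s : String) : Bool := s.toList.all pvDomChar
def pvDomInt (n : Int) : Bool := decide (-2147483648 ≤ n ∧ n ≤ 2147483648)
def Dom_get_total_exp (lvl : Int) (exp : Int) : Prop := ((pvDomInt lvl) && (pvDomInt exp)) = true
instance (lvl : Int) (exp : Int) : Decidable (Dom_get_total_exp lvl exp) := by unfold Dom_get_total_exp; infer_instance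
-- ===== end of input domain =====

-- B replaces A's O(lvl) decrementing summation loop with the closed-form arithmetic series (objective: faster).

-- ===== PORT A =====
-- the 'while num > 0' loop, state (num, total)
def get_total_exp_loop (num total : Int) : Int :=
  if num > 0 then get_total_exp_loop (num - 1) (total + num * 100) else total
termination_by num.toNat
decreasing_by
  have : 0 < num := by omega
  omega

def get_total_exp (lvl : Int) (exp : Int) : Int :=
  get_total_exp_loop (lvl - 1) 0 + exp

-- ===== PORT B =====
def get_total_exp_alt (lvl : Int) (exp : Int) : Int :=
  let n := lvl - 1
  if n ≤ 0 then exp else 50 * n * (n + 1) + exp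

-- ===== PRECONDITION & SPEC =====
def Spec_get_total_exp (lvl : Int) (exp : Int) (out : Int) : Prop := out = get_total_exp_alt lvl exp
instance (lvl : Int) (exp : Int) (out : Int) : Decidable (Spec_get_total_exp lvl exp out) := by unfold Spec_get_total_exp; infer_instance

-- ===== CLAIM (what is proved, stated in full; the proofs are below) =====
def Claim_equal_get_total_exp : Prop := ∀ (lvl : Int) (exp : Int), Dom_get_total_exp lvl exp → Spec_get_total_exp lvl exp (get_total_exp lvl exp)

-- ===== LEMMAS AND PROOFS =====
theorem get_total_exp_loop_eq (num total : Int) :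
    get_total_exp_loop num total = total + (if num ≤ 0 then 0 else 50 * num * (num + 1)) := by
  by_cases h : num > 0
  · rw [get_total_exp_loop]
    simp only [h, if_true]
    rw [get_total_exp_loop_eq (num - 1)]
    rw [if_neg (by omega : ¬ num ≤ 0)]
    by_cases h1 : num - 1 ≤ 0
    · have : num = 1 := by omega
      subst this; norm_num
    · rw [if_neg h1]; ring
  · rw [get_total_exp_loop]
    simp only [h, if_false]
    omega
termination_by num.toNat
decreasing_by
  have : 0 < num := by omega
  omega

-- ===== VERDICT (by name: the statement is the Claim_ definition above) =====
theorem get_total_exp_spec : Claim_equal_get_total_exp := by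
  intro lvl exp _
  unfold Spec_get_total_exp get_total_exp get_total_exp_alt
  rw [get_total_exp_loop_eq]
  split_ifs with h <;> ring_nf <;> omega
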